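-- pv_equiv track=rewrite | github.com/junaidiiith/GLM-Stereotype-Prediction | data_utils.py | get_updated_encoding
-- ===== SOURCE A (Python) =====
-- def get_updated_encoding(input_ids, current_token, update_token):
--     i = 0
--     updated_input_ids, labels = list(), list()
--     while i < len(input_ids):
--         curr_token = input_ids[i]
--         if curr_token == current_token:
--             i += 1
--             while i < len(input_ids) and input_ids[i] != current_token:
--                 labels.append(input_ids[i])
--                 updated_input_ids.append(update_token)
--                 i += 1
--         else:
--             updated_input_ids.append(curr_token)
--             labels.append(-100)
--         i += 1
--     attention_mask = [1] * len(updated_input_ids)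
--     return updated_input_ids, attention_mask, labels
-- ===== SOURCE B (Python) =====
-- def get_updated_encoding(input_ids, current_token, update_token):
--     updated_input_ids, labels = [], []
--     inside = False
--     for t in input_ids:
--         if t == current_token:
--             inside = not inside
--         elif inside:
--             updated_input_ids.append(update_token)
--             labels.append(t)
--         else:
--             updated_input_ids.append(t)
--             labels.append(-100)
--     attention_mask = [1] * len(updated_input_ids)
--     return updated_input_ids, attention_mask, labels
-- ===== Notes on version B (the rewrite author's own statement) =====
-- stated objective: simpler
-- what changed: Replaced the nested open/scan-until-close while-loops with one flat pass maintaining a boolean 'inside' flag that toggles on every delimiter token.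
import Mathlib
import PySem

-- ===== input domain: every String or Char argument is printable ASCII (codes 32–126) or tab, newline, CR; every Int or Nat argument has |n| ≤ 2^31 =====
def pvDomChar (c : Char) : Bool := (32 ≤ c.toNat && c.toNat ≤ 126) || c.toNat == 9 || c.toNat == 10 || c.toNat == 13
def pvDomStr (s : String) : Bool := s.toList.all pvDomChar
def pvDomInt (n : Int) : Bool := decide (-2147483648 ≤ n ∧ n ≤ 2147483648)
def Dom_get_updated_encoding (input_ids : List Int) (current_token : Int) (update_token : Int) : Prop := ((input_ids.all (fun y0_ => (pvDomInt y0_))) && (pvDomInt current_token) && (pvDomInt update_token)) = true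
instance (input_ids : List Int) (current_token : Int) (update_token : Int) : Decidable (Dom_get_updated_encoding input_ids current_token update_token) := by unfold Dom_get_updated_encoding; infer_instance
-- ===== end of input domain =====

-- B replaces A's nested open/scan-until-close while-loops by one flat pass with a
-- toggled boolean 'inside' flag (objective: simpler decomposition, same cost).

-- ===== PORT A =====
-- the inner while-loop: scans until the next current_token (or end), appending
-- update_token to updated_input_ids and the scanned token to labels; returns the
-- remaining list (starting at the closing delimiter, if any) and both accumulators
def pvInnerA (cur ut : Int) : List Int → List Int → List Int → List Int × List Int × List Int
  | [], upd, lab => ([], upd, lab)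
  | y :: ys, upd, lab =>
    if y ≠ cur then pvInnerA cur ut ys (upd ++ [ut]) (lab ++ [y])
    else (y :: ys, upd, lab)

theorem pvInnerA_len (cur ut : Int) : ∀ (xs upd lab : List Int),
    (pvInnerA cur ut xs upd lab).1.length ≤ xs.length := by
  intro xs
  induction xs with
  | nil => intro upd lab; simp [pvInnerA]
  | cons y ys ih =>
    intro upd lab
    by_cases h : y = cur
    · simp [pvInnerA, h]
    · simp only [pvInnerA, if_pos (by exact h)]
      exact le_trans (ih _ _) (Nat.le_succ _)

-- the outer while-loop; `.drop 1` is the outer `i += 1` after the inner loop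
def pvOuterA (cur ut : Int) : List Int → List Int → List Int → List Int × List Int
  | [], upd, lab => (upd, lab)
  | x :: xs, upd, lab =>
    if x = cur then
      let r := pvInnerA cur ut xs upd lab
      pvOuterA cur ut (r.1.drop 1) r.2.1 r.2.2
    else pvOuterA cur ut xs (upd ++ [x]) (lab ++ [-100])
termination_by xs => xs.length
decreasing_by
  · exact Nat.lt_succ_of_le (le_trans (by rw [List.length_drop]; omega) (pvInnerA_len cur ut xs upd lab))
  · simp

def get_updated_encoding (input_ids : List Int) (current_token : Int) (update_token : Int) : List Int × List Int × List Int :=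
  let r := pvOuterA current_token update_token input_ids [] []
  (r.1, List.replicate r.1.length 1, r.2)

-- ===== PORT B =====
-- one step of B's flat loop over the state (inside, updated_input_ids, labels)
def pvStepB (cur ut : Int) (st : Bool × List Int × List Int) (t : Int) : Bool × List Int × List Int :=
  if t = cur then (!st.1, st.2)
  else if st.1 then (st.1, st.2.1 ++ [ut], st.2.2 ++ [t])
  else (st.1, st.2.1 ++ [t], st.2.2 ++ [-100])

def get_updated_encoding_alt (input_ids : List Int) (current_token : Int) (update_token : Int) : List Int × List Int × List Int :=
  let r := input_ids.foldl (pvStepB current_token update_token) (false, [], [])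
  (r.2.1, List.replicate r.2.1.length 1, r.2.2)

-- ===== PRECONDITION & SPEC =====
def Spec_get_updated_encoding (input_ids : List Int) (current_token : Int) (update_token : Int) (out : List Int × List Int × List Int) : Prop := out = get_updated_encoding_alt input_ids current_token update_token
instance (input_ids : List Int) (current_token : Int) (update_token : Int) (out : List Int × List Int × List Int) : Decidable (Spec_get_updated_encoding input_ids current_token update_token out) := by unfold Spec_get_updated_encoding; infer_instance

-- ===== CLAIM (what is proved, stated in full; the proofs are below) =====
def Claim_equal_get_updated_encoding : Prop := ∀ (input_ids : List Int) (current_token : Int) (update_token : Int), Dom_get_updated_encoding input_ids current_token update_token → Spec_get_updated_encoding input_ids current_token update_token (get_updated_encoding input_ids current_token update_token)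

-- ===== LEMMAS AND PROOFS =====
-- joint invariant: A's outer loop (starting outside a region) and A's inner loop
-- followed by the skip of the closing delimiter (i.e. the flow while inside a
-- region) each equal B's fold with the corresponding value of the 'inside' flag
theorem pv_key (cur ut : Int) : ∀ (n : ℕ) (xs : List Int), xs.length ≤ n → ∀ (upd lab : List Int),
    pvOuterA cur ut xs upd lab = (List.foldl (pvStepB cur ut) (false, upd, lab) xs).2 ∧
    (let r := pvInnerA cur ut xs upd lab
     pvOuterA cur ut (r.1.drop 1) r.2.1 r.2.2) = (List.foldl (pvStepB cur ut) (true, upd, lab) xs).2 := by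
  intro n
  induction n with
  | zero =>
    intro xs hlen upd lab
    have hx : xs = [] := List.eq_nil_of_length_eq_zero (Nat.le_zero.mp hlen)
    subst hx
    constructor <;> simp [pvOuterA, pvInnerA]
  | succ n ih =>
    intro xs hlen upd lab
    cases xs with
    | nil => constructor <;> simp [pvOuterA, pvInnerA]
    | cons x xs =>
      have hxs : xs.length ≤ n := Nat.lt_succ_iff.mp (by simpa using hlen)
      by_cases h : x = cur
      · constructor
        · rw [pvOuterA]
          simp only [if_pos h, List.foldl_cons, pvStepB, if_pos h]
          exact (ih xs hxs upd lab).2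
        · simp only [pvInnerA, h, ne_eq, not_true_eq_false, if_neg, List.foldl_cons,
            pvStepB, if_pos h]
          simpa using (ih xs hxs upd lab).1
      · constructor
        · rw [pvOuterA]
          simp only [if_neg h, List.foldl_cons, pvStepB, if_neg h]
          exact (ih xs hxs (upd ++ [x]) (lab ++ [-100])).1
        · simp only [pvInnerA, if_pos (by exact h), List.foldl_cons, pvStepB, if_neg h]
          exact (ih xs hxs (upd ++ [ut]) (lab ++ [x])).2

-- ===== VERDICT (by name: the statement is the Claim_ definition above) =====
theorem get_updated_encoding_spec : Claim_equal_get_updated_encoding := by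
  intro input_ids cur ut _
  unfold Spec_get_updated_encoding get_updated_encoding get_updated_encoding_alt
  rw [(pv_key cur ut input_ids.length input_ids le_rfl [] []).1]
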